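-- pv_equiv track=rewrite | github.com/shinichi1729/Atcoder_typical_90_problem | ans/060.py | solve
-- ===== SOURCE A (Python) =====
-- def check(dp, now, value):
--     left, right = -1, now
--     while right-left > 1:
--         mid = (left + right) // 2
--         if dp[mid] <= value:
--             left = mid
--         else:
--             right = mid
--     return right
--
-- def solve(N, A):
--     dp = [0] * N
--     dp[0] = A[0]
--     now = 1  # dp[now]: 一番左にある0のindex
--     res = [0] * N
--     res[0] = 1
--     for i in range(1, N):
--         a = A[i]
--         insert = check(dp, now, a)
--         if insert == 0 or dp[insert-1] != a:
--             dp[insert] = a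
--             if insert == now:
--                 now += 1
--         res[i] = now
--     return res
-- ===== SOURCE B (Python) =====
-- def solve(N, A):
--     tails = []
--     res = []
--     for i in range(N):
--         a = A[i]
--         p = 0
--         while p < len(tails) and tails[p] < a:
--             p += 1
--         if p == len(tails):
--             tails.append(a)
--         else:
--             tails[p] = a
--         res.append(len(tails))
--     return res
-- ===== Notes on version B (the rewrite author's own statement) =====
-- stated objective: simpler
-- what changed: B drops A's preallocated tails array, hand-written binary search, duplicate-skip branch and `now` pointer, and instead keeps a growing sorted tails list updated by a linear replace-first-element->= scan, appending the running length to the result.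
import Mathlib
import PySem

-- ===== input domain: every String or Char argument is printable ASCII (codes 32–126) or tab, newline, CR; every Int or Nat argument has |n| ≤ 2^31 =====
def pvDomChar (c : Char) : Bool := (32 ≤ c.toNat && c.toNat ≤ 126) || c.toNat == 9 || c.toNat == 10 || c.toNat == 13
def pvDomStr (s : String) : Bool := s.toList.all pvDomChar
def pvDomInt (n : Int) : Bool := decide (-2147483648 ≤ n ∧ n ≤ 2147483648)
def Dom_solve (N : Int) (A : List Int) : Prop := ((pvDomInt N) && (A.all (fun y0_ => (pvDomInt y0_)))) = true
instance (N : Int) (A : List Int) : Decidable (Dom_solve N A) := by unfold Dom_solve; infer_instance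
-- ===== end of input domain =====

-- B replaces A's preallocated tails array + manual binary search + duplicate-skip branch + `now`
-- pointer by a growing sorted tails list updated with a linear replace-first-≥ scan (simpler; not faster).

-- ===== PORT A =====
-- termination facts for the while-loop of `check` (cited by name in decreasing_by)
lemma checkGo_dec_left (left right : Int) (h : right - left > 1) :
    (right - PySem.Int.floordiv (left + right) 2).toNat < (right - left).toNat := by
  have hm : (PySem.Int.floordiv (left + right) 2) * 2 ≤ left + right ∧
      left + right < (PySem.Int.floordiv (left + right) 2 + 1) * 2 :=
    (PySem.Int.floordiv_eq_iff_of_pos (by norm_num)).mp rfl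
  omega

lemma checkGo_dec_right (left right : Int) (h : right - left > 1) :
    (PySem.Int.floordiv (left + right) 2 - left).toNat < (right - left).toNat := by
  have hm : (PySem.Int.floordiv (left + right) 2) * 2 ≤ left + right ∧
      left + right < (PySem.Int.floordiv (left + right) 2 + 1) * 2 :=
    (PySem.Int.floordiv_eq_iff_of_pos (by norm_num)).mp rfl
  omega

-- the while-loop of Python `check`, recursing on the shrinking interval (left, right)
def checkGo (dp : List Int) (value left right : Int) : Int :=
  if _h : right - left > 1 then
    let mid := PySem.Int.floordiv (left + right) 2
    -- dp[mid]: ported total with pyGetD; under Pre_solve every index reached is in range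
    if PySem.List.pyGetD dp mid 0 ≤ value then checkGo dp value mid right
    else checkGo dp value left mid
  else right
termination_by (right - left).toNat
decreasing_by
  · exact checkGo_dec_left left right _h
  · exact checkGo_dec_right left right _h

def check (dp : List Int) (now value : Int) : Int :=
  checkGo dp value (-1) now

-- one iteration of A's `for i in range(1, N)` loop; state = (dp, now, res)
def stepA (A : List Int) (s : List Int × Int × List Int) (i : Int) : List Int × Int × List Int :=
  let a := PySem.List.pyGetD A i 0
  let ins := check s.1 s.2.1 a
  let dn : List Int × Int :=
    if ins = 0 ∨ ¬ PySem.List.pyGetD s.1 (ins - 1) 0 = a then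
      (PySem.List.pySetD s.1 ins a, if ins = s.2.1 then s.2.1 + 1 else s.2.1)
    else (s.1, s.2.1)
  (dn.1, dn.2, PySem.List.pySetD s.2.2 i dn.2)

def solve (N : Int) (A : List Int) : List Int :=
  -- dp = [0]*N; dp[0] = A[0]  (A[0] / dp[0] raise outside Pre_solve; ported total with pyGetD/pySetD)
  let dp := PySem.List.pySetD (List.replicate N.toNat (0 : Int)) 0 (PySem.List.pyGetD A 0 0)
  -- res = [0]*N; res[0] = 1
  let res := PySem.List.pySetD (List.replicate N.toNat (0 : Int)) 0 1
  ((PySem.List.pyRange 1 N 1).foldl (stepA A) (dp, 1, res)).2.2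

-- ===== PORT B =====
-- the `while p < len(tails) and tails[p] < a: p += 1` scan
def scanPos (tails : List Int) (a : Int) : Nat :=
  match tails with
  | [] => 0
  | t :: ts => if t < a then scanPos ts a + 1 else 0

-- one iteration of B's loop; state = (tails, res)
def stepB (A : List Int) (s : List Int × List Int) (i : Nat) : List Int × List Int :=
  let a := PySem.List.pyGetD A (i : Int) 0
  let p := scanPos s.1 a
  let t2 := if p = s.1.length then s.1 ++ [a] else s.1.set p a
  (t2, s.2 ++ [(t2.length : Int)])

def solve_alt (N : Int) (A : List Int) : List Int :=
  ((List.range N.toNat).foldl (stepB A) ([], [])).2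

-- ===== PRECONDITION & SPEC =====
-- Pre_solve = exactly the inputs where the Python A returns: it raises IndexError when N < 1
-- (dp[0] on an empty dp) and when N > len(A) (A[i] out of range).
def Pre_solve (N : Int) (A : List Int) : Prop := 1 ≤ N ∧ N ≤ A.length
instance (N : Int) (A : List Int) : Decidable (Pre_solve N A) := by unfold Pre_solve; infer_instance
def pvWitness_solve : Int × List Int := (3, [2, 1, 3])

def Spec_solve (N : Int) (A : List Int) (out : List Int) : Prop := out = solve_alt N A
instance (N : Int) (A : List Int) (out : List Int) : Decidable (Spec_solve N A out) := by unfold Spec_solve; infer_instance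

-- ===== CLAIM (what is proved, stated in full; the proofs are below) =====
def Claim_equal_solve : Prop := ∀ (N : Int) (A : List Int), Dom_solve N A → Pre_solve N A → Spec_solve N A (solve N A)

-- ===== LEMMAS AND PROOFS =====

-- characterisation of countP on a strictly increasing list: a downward-closed predicate holds
-- exactly on an initial segment, whose length is the count
lemma countP_char (t : List Int) (P : Int → Bool)
    (hmono : ∀ x y : Int, x < y → P y = true → P x = true)
    (hs : t.Pairwise (· < ·)) (j : Nat) (hj : j < t.length) :
    (P t[j] = true ↔ j < t.countP P) := by
  induction t generalizing j with
  | nil => simp at hj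
  | cons x ts ih =>
    have hx : ∀ y ∈ ts, x < y := fun y hy => (List.pairwise_cons.mp hs).1 y hy
    have hs' := (List.pairwise_cons.mp hs).2
    rw [List.countP_cons]
    by_cases hP : P x = true
    · cases j with
      | zero => simp [hP]
      | succ j =>
        have hih := ih hs' j (by simpa using hj)
        simp only [hP, if_true, List.getElem_cons_succ, hih]
        omega
    · have hz : ts.countP P = 0 := by
        rw [List.countP_eq_zero]
        intro y hy hPy
        exact hP (hmono x y (hx y hy) hPy)
      simp only [hP, if_false, hz, Bool.false_eq_true]
      cases j with
      | zero => simp [hP]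
      | succ j =>
        simp only [List.getElem_cons_succ]
        constructor
        · intro h'
          exact absurd (hmono x _ (hx _ (List.getElem_mem (by simpa using hj))) h') hP
        · intro h'; omega

lemma checkGo_eq (dp : List Int) (v c now : Int)
    (h1 : ∀ j : Int, 0 ≤ j → j < c → PySem.List.pyGetD dp j 0 ≤ v)
    (h2 : ∀ j : Int, c ≤ j → j < now → ¬ (PySem.List.pyGetD dp j 0 ≤ v)) :
    ∀ (n : Nat) (left right : Int), (right - left).toNat = n → -1 ≤ left →
      left < c → c ≤ right → right ≤ now → checkGo dp v left right = c := by
  intro n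
  induction n using Nat.strong_induction_on with
  | _ n ih =>
    intro left right hn h0 hlc hcr hrn
    rw [checkGo]
    by_cases hlr : right - left > 1
    · rw [dif_pos hlr]
      have hb : (PySem.Int.floordiv (left + right) 2) * 2 ≤ left + right ∧
          left + right < (PySem.Int.floordiv (left + right) 2 + 1) * 2 :=
        (PySem.Int.floordiv_eq_iff_of_pos (by norm_num)).mp rfl
      set mid := PySem.Int.floordiv (left + right) 2 with hmid
      show (if PySem.List.pyGetD dp mid 0 ≤ v then checkGo dp v mid right
            else checkGo dp v left mid) = c
      by_cases hle : PySem.List.pyGetD dp mid 0 ≤ v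
      · rw [if_pos hle]
        have hmc : mid < c := by
          by_contra h'
          exact (h2 mid (by omega) (by omega)) hle
        exact ih (right - mid).toNat (by omega) mid right rfl (by omega) hmc hcr hrn
      · rw [if_neg hle]
        have hmc : c ≤ mid := by
          by_contra h'
          exact hle (h1 mid (by omega) (by omega))
        exact ih (mid - left).toNat (by omega) left mid rfl h0 hlc hmc (by omega)
    · rw [dif_neg hlr]; omega

lemma scanPos_eq_countP (t : List Int) (a : Int) (hs : t.Pairwise (· < ·)) :
    scanPos t a = t.countP (fun x => decide (x < a)) := by
  induction t with
  | nil => rfl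
  | cons x ts ih =>
    have hx : ∀ y ∈ ts, x < y := fun y hy => (List.pairwise_cons.mp hs).1 y hy
    have hs' := (List.pairwise_cons.mp hs).2
    rw [List.countP_cons]
    by_cases hlt : x < a
    · simp [scanPos, hlt, ih hs']
    · have hz : ts.countP (fun x => decide (x < a)) = 0 := by
        rw [List.countP_eq_zero]
        intro y hy
        simp only [decide_eq_true_eq]
        have := hx y hy; omega
      simp [scanPos, hlt, hz]

-- (l.set n a).take (n+1) = l.take n ++ [a]
lemma take_set_succ {α : Type} (l : List α) (n : Nat) (a : α) (h : n < l.length) :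
    (l.set n a).take (n + 1) = l.take n ++ [a] := by
  induction l generalizing n with
  | nil => simp at h
  | cons x xs ih =>
    cases n with
    | zero => simp
    | succ n =>
      simp only [List.set_cons_succ, List.take_succ_cons, List.cons_append]
      rw [ih n (by simpa using h)]

-- the invariant tying A's state (dp, now, res) to B's state (tails, resB) after the first k elements
def PInv (N : Int) (k : Nat) (sA : List Int × Int × List Int) (sB : List Int × List Int) : Prop :=
  sA.2.1 = (sB.1.length : Int) ∧
  sB.1 = sA.1.take sB.1.length ∧
  sA.1.length = N.toNat ∧
  sB.1.Pairwise (· < ·) ∧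
  1 ≤ sB.1.length ∧
  sB.1.length ≤ k ∧
  sA.2.2 = sB.2 ++ List.replicate (N.toNat - k) 0 ∧
  sB.2.length = k

-- setting res[k] when the first k cells are already the produced prefix
lemma res_update (res resB : List Int) (M k : Nat) (now : Int)
    (h_res : res = resB ++ List.replicate (M - k) 0) (h_resl : resB.length = k) (hk : k < M) :
    PySem.List.pySetD res (k : Int) now = (resB ++ [now]) ++ List.replicate (M - (k + 1)) 0 := by
  have hMk : M - k = (M - (k + 1)) + 1 := by omega
  rw [PySem.List.pySetD_natCast, h_res, hMk, List.replicate_succ, List.set_append]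
  simp [h_resl]

lemma step_inv (N : Int) (A : List Int) (k : Nat) (_hk1 : 1 ≤ k) (hkN : k < N.toNat)
    (sA : List Int × Int × List Int) (sB : List Int × List Int)
    (h : PInv N k sA sB) :
    PInv N (k + 1) (stepA A sA (k : Int)) (stepB A sB k) := by
  obtain ⟨dp, now, res⟩ := sA
  obtain ⟨tails, resB⟩ := sB
  obtain ⟨h_now, h_pref, h_len, h_sort, h_ge1, h_lek, h_res, h_resl⟩ := h
  simp only at h_now h_pref h_len h_sort h_ge1 h_lek h_res h_resl
  set a := PySem.List.pyGetD A ((k : Nat) : Int) 0 with ha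
  have hlenlt : tails.length < dp.length := by omega
  -- the dp prefix is tails
  have hpr : ∀ (j : Nat) (hj : j < tails.length), tails[j]'(hj) = dp[j]'(by omega) := by
    intro j hj
    rw [List.getElem_of_eq h_pref hj, List.getElem_take]
  set c := tails.countP (fun x => decide (x ≤ a)) with hc
  set p := scanPos tails a with hp
  have hple : p = tails.countP (fun x => decide (x < a)) := scanPos_eq_countP tails a h_sort
  have hcle : c ≤ tails.length := List.countP_le_length
  have hplen : p ≤ tails.length := by rw [hple]; exact List.countP_le_length
  have charLE : ∀ (j : Nat) (hj : j < tails.length), (tails[j]'(hj) ≤ a ↔ j < c) := by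
    intro j hj
    have := countP_char tails (fun x => decide (x ≤ a))
      (fun x y hxy hy => by simp only [decide_eq_true_eq] at *; omega) h_sort j hj
    simpa using this
  have charLT : ∀ (j : Nat) (hj : j < tails.length), (tails[j]'(hj) < a ↔ j < p) := by
    intro j hj
    have := countP_char tails (fun x => decide (x < a))
      (fun x y hxy hy => by simp only [decide_eq_true_eq] at *; omega) h_sort j hj
    rw [hple]
    simpa using this
  have hgetmono : ∀ (i j : Nat) (hi : i < tails.length) (hj : j < tails.length), i < j →
      tails[i]'(hi) < tails[j]'(hj) := by
    intro i j hi hj hij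
    exact List.pairwise_iff_getElem.mp h_sort i j hi hj hij
  -- A's binary search returns the count of tails entries ≤ a
  have hins : check dp now a = (c : Int) := by
    unfold check
    refine checkGo_eq dp a (c : Int) ((tails.length : Nat) : Int) ?_ ?_
      (now - (-1)).toNat (-1) now rfl (by omega) (by omega) (by omega) (by omega)
    · intro j hj0 hjc
      have hjl : j.toNat < tails.length := by omega
      rw [PySem.List.pyGetD_eq_getElem dp 0 hj0 (by omega), ← hpr j.toNat hjl]
      exact (charLE j.toNat hjl).mpr (by omega)
    · intro j hjc hjl
      have hjl' : j.toNat < tails.length := by omega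
      rw [PySem.List.pyGetD_eq_getElem dp 0 (by omega) (by omega), ← hpr j.toNat hjl']
      intro hle
      have := (charLE j.toNat hjl').mp hle
      omega
  by_cases hmem : a ∈ tails
  · -- duplicate: A's skip branch fires, B's set is a no-op
    obtain ⟨q, hq, hqa⟩ := List.getElem_of_mem hmem
    have hqc : q < c := (charLE q hq).mp (by rw [hqa])
    have hcq : c = q + 1 := by
      by_contra h'
      have hq1 : q + 1 < tails.length := by omega
      have := (charLE (q + 1) hq1).mpr (by omega)
      have := hgetmono q (q + 1) hq hq1 (by omega)
      omega
    have hpq : p = q := by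
      have h1 : ¬ (tails[q]'(hq) < a) := by rw [hqa]; omega
      have h2 : ¬ (q < p) := fun hqp => h1 ((charLT q hq).mpr hqp)
      by_contra h'
      have hplt : p < q := by omega
      have h4 : ¬ (tails[p]'(by omega) < a) :=
        fun hlt => absurd ((charLT p (by omega)).mp hlt) (by omega)
      have := hgetmono p q (by omega) hq hplt
      rw [hqa] at this
      omega
    have hAcond : ¬ ((c : Int) = 0 ∨ ¬ PySem.List.pyGetD dp ((c : Int) - 1) 0 = a) := by
      simp only [not_or, not_not]
      refine ⟨by omega, ?_⟩
      have he : ((c : Int) - 1) = ((q : Nat) : Int) := by omega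
      rw [he, PySem.List.pyGetD_natCast, List.getD_eq_getElem _ _ (by omega), ← hpr q hq, hqa]
    have hBset : tails.set p a = tails := by
      rw [hpq, ← hqa]
      exact List.set_getElem_self hq
    have hA : stepA A (dp, now, res) ((k : Nat) : Int)
        = (dp, now, PySem.List.pySetD res ((k : Nat) : Int) now) := by
      simp only [stepA, ← ha, hins, if_neg hAcond]
    have hB : stepB A (tails, resB) k = (tails, resB ++ [((tails.length : Nat) : Int)]) := by
      simp only [stepB, ← ha, ← hp]
      rw [if_neg (show ¬ p = tails.length by omega), hBset]
    rw [hA, hB]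
    refine ⟨h_now, h_pref, h_len, h_sort, h_ge1, show tails.length ≤ k + 1 by omega, ?_,
      by simp [h_resl]⟩
    rw [res_update res resB N.toNat k now h_res h_resl hkN, h_now]
  · -- a not in tails: both write a at position p = c
    have hcp : c = p := by
      rw [hc, hple]
      refine List.countP_congr ?_
      intro x hx
      simp only [decide_eq_true_eq]
      constructor
      · intro hxa
        rcases lt_or_eq_of_le hxa with h' | h'
        · exact h'
        · exact absurd (h' ▸ hx) hmem
      · omega
    by_cases hpl : p = tails.length
    · -- append case: insert == now, now increments
      have hall : ∀ x ∈ tails, x < a := by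
        have hfull : tails.countP (fun x => decide (x < a)) = tails.length := by omega
        intro x hx
        simpa using List.countP_eq_length.mp hfull x hx
      have hAcond : ((c : Int) = 0 ∨ ¬ PySem.List.pyGetD dp ((c : Int) - 1) 0 = a) := by
        by_cases hc0 : c = 0
        · exact Or.inl (by omega)
        · refine Or.inr ?_
          have hql : c - 1 < tails.length := by omega
          have he : ((c : Int) - 1) = ((c - 1 : Nat) : Int) := by omega
          rw [he, PySem.List.pyGetD_natCast, List.getD_eq_getElem _ _ (by omega),
            ← hpr (c - 1) hql]
          have := hall _ (List.getElem_mem hql)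
          omega
      have hA : stepA A (dp, now, res) ((k : Nat) : Int)
          = (PySem.List.pySetD dp ((c : Nat) : Int) a, now + 1,
             PySem.List.pySetD res ((k : Nat) : Int) (now + 1)) := by
        simp only [stepA, ← ha, hins, if_pos hAcond, if_pos (show (c : Int) = now by omega)]
      have hB : stepB A (tails, resB) k
          = (tails ++ [a], resB ++ [(((tails ++ [a]).length : Nat) : Int)]) := by
        simp only [stepB, ← ha, ← hp, if_pos hpl]
      rw [hA, hB]
      refine ⟨?_, ?_, ?_, ?_, ?_, ?_, ?_, ?_⟩
      · simp only [List.length_append, List.length_singleton]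
        omega
      · rw [PySem.List.pySetD_natCast]
        have hcl : c = tails.length := by omega
        rw [hcl]
        simp only [List.length_append, List.length_singleton]
        rw [take_set_succ dp tails.length a hlenlt, ← h_pref]
      · simp [h_len]
      · rw [List.pairwise_append]
        exact ⟨h_sort, List.pairwise_singleton _ _, fun x hx y hy => by
          simp only [List.mem_singleton] at hy; rw [hy]; exact hall x hx⟩
      · simp
      · simp only [List.length_append, List.length_singleton]; omega
      · rw [res_update res resB N.toNat k (now + 1) h_res h_resl hkN, h_now]
        simp only [List.length_append, List.length_singleton]
        push_cast
        ring_nf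
      · simp [h_resl]
    · -- replace case: insert < now, now unchanged
      have hplt : p < tails.length := by omega
      have hage : a ≤ tails[p]'(hplt) := by
        have : ¬ (tails[p]'(hplt) < a) := fun h' => absurd ((charLT p hplt).mp h') (by omega)
        omega
      have hAcond : ((c : Int) = 0 ∨ ¬ PySem.List.pyGetD dp ((c : Int) - 1) 0 = a) := by
        by_cases hc0 : c = 0
        · exact Or.inl (by omega)
        · refine Or.inr ?_
          have hql : c - 1 < tails.length := by omega
          have he : ((c : Int) - 1) = ((c - 1 : Nat) : Int) := by omega
          rw [he, PySem.List.pyGetD_natCast, List.getD_eq_getElem _ _ (by omega),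
            ← hpr (c - 1) hql]
          have := (charLT (c - 1) hql).mpr (by omega)
          omega
      have hA : stepA A (dp, now, res) ((k : Nat) : Int)
          = (PySem.List.pySetD dp ((c : Nat) : Int) a, now,
             PySem.List.pySetD res ((k : Nat) : Int) now) := by
        simp only [stepA, ← ha, hins, if_pos hAcond,
          if_neg (show ¬ (c : Int) = now by omega)]
      have hB : stepB A (tails, resB) k
          = (tails.set p a, resB ++ [(((tails.set p a).length : Nat) : Int)]) := by
        simp only [stepB, ← ha, ← hp, if_neg hpl]
      rw [hA, hB]
      refine ⟨?_, ?_, ?_, ?_, ?_, ?_, ?_, ?_⟩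
      · simp only [List.length_set]
        exact h_now
      · rw [PySem.List.pySetD_natCast, hcp]
        simp only [List.length_set]
        rw [List.take_set, ← h_pref]
      · simp [h_len]
      · rw [List.pairwise_iff_getElem]
        intro i j hi hj hij
        simp only [List.length_set] at hi hj
        rw [List.getElem_set, List.getElem_set]
        by_cases hip : p = i
        · rw [if_pos hip, if_neg (by omega)]
          have := hgetmono p j (by omega) hj (by omega)
          omega
        · rw [if_neg hip]
          by_cases hjp : p = j
          · rw [if_pos hjp]
            have := (charLT i hi).mpr (by omega)
            omega
          · rw [if_neg hjp]
            exact hgetmono i j hi hj hij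
      · simp only [List.length_set]; omega
      · simp only [List.length_set]; omega
      · rw [res_update res resB N.toNat k now h_res h_resl hkN, h_now]
        simp
      · simp [h_resl]

lemma fold_inv (N : Int) (A : List Int) :
    ∀ (m k : Nat), 1 ≤ k → k + m ≤ N.toNat →
    ∀ (sA : List Int × Int × List Int) (sB : List Int × List Int), PInv N k sA sB →
    PInv N (k + m) (List.foldl (stepA A) sA ((List.range' k m).map (fun (j : Nat) => (j : Int))))
      (List.foldl (stepB A) sB (List.range' k m)) := by
  intro m
  induction m with
  | zero => intro k _ _ sA sB h; simpa using h
  | succ m ih =>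
    intro k hk1 hkm sA sB h
    rw [List.range'_succ]
    simp only [List.foldl_cons]
    have h1 := step_inv N A k hk1 (by omega) sA sB h
    have := ih (k + 1) (by omega) (by omega) _ _ h1
    simpa [Nat.add_assoc, Nat.add_comm 1 m] using this

-- ===== VERDICT (by name: the statement is the Claim_ definition above) =====
theorem solve_spec : Claim_equal_solve := by
  unfold Claim_equal_solve
  intro N A _hdom hpre
  obtain ⟨hN1, hNA⟩ := hpre
  have hM1 : 1 ≤ N.toNat := by omega
  unfold Spec_solve
  simp only [solve, solve_alt]
  have hrange : PySem.List.pyRange 1 N 1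
      = (List.range' 1 (N.toNat - 1)).map (fun (j : Nat) => (j : Int)) := by
    rw [PySem.List.pyRange_one, List.range'_eq_map_range, List.map_map]
    have he : (N - 1).toNat = N.toNat - 1 := by omega
    rw [he]
    refine List.map_congr_left fun x _ => ?_
    simp
  have hrangeB : List.range N.toNat = 0 :: List.range' 1 (N.toNat - 1) := by
    rw [List.range_eq_range']
    conv_lhs => rw [show N.toNat = (N.toNat - 1) + 1 from by omega]
    rw [List.range'_succ]
  have hrep : List.replicate N.toNat (0 : Int) = 0 :: List.replicate (N.toNat - 1) 0 := by
    conv_lhs => rw [show N.toNat = (N.toNat - 1) + 1 from by omega]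
    rw [List.replicate_succ]
  have hdp0 : PySem.List.pySetD (List.replicate N.toNat (0 : Int)) 0 (PySem.List.pyGetD A 0 0)
      = PySem.List.pyGetD A 0 0 :: List.replicate (N.toNat - 1) 0 := by
    rw [hrep, show (0 : Int) = ((0 : Nat) : Int) from by simp, PySem.List.pySetD_natCast]
    simp
  have hres0 : PySem.List.pySetD (List.replicate N.toNat (0 : Int)) 0 1
      = 1 :: List.replicate (N.toNat - 1) 0 := by
    rw [hrep, show (0 : Int) = ((0 : Nat) : Int) from by simp, PySem.List.pySetD_natCast]
    simp
  have hB0 : stepB A ([], []) 0 = ([PySem.List.pyGetD A 0 0], [(1 : Int)]) := by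
    simp [stepB, scanPos]
  have hinit : PInv N 1
      (PySem.List.pySetD (List.replicate N.toNat (0 : Int)) 0 (PySem.List.pyGetD A 0 0), 1,
       PySem.List.pySetD (List.replicate N.toNat (0 : Int)) 0 1)
      ([PySem.List.pyGetD A 0 0], [(1 : Int)]) := by
    refine ⟨by simp, by simp [hdp0], by simp [hdp0]; omega, by simp, by simp, by simp,
      by simp [hres0], by simp⟩
  have hfin := fold_inv N A (N.toNat - 1) 1 (by omega) (by omega) _ _ hinit
  rw [show 1 + (N.toNat - 1) = N.toNat from by omega] at hfin
  obtain ⟨-, -, -, -, -, -, h7, -⟩ := hfin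
  rw [hrange, hrangeB, List.foldl_cons, hB0]
  rw [h7]
  simp
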